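-- pv_equiv track=rewrite | github.com/manavv003/pypract | Assignment - 3/matrix.py | minit
-- ===== SOURCE A (Python) =====
-- def minit(rows,col,val=0,inc=0):
--     mat=[]
--     for i in range(rows):
--         mat.append([])
--
--         for j in range(col):
--             mat[i].append(val)
--             val+=inc
--     return mat
-- ===== SOURCE B (Python) =====
-- def minit(rows, col, val=0, inc=0):
--     # generate-then-reshape: one flat pass producing all rows*col values,
--     # then cut the flat list into rows of col with slices
--     if col <= 0:
--         return [[] for _ in range(rows)]
--     flat = []
--     for _ in range(rows * col):
--         flat.append(val)
--         val += inc
--     return [flat[i * col:(i + 1) * col] for i in range(rows)]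
-- ===== Notes on version B (the rewrite author's own statement) =====
-- stated objective: alternative
-- what changed: Replaces the nested fill loop (append empty row, then append value-by-value into mat[i]) by a generate-then-reshape pair: after an early return of rows empty rows for nonpositive col, one flat pass builds all rows*col values and the matrix is a comprehension slicing col values at a time out of the flat list.
import Mathlib
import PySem

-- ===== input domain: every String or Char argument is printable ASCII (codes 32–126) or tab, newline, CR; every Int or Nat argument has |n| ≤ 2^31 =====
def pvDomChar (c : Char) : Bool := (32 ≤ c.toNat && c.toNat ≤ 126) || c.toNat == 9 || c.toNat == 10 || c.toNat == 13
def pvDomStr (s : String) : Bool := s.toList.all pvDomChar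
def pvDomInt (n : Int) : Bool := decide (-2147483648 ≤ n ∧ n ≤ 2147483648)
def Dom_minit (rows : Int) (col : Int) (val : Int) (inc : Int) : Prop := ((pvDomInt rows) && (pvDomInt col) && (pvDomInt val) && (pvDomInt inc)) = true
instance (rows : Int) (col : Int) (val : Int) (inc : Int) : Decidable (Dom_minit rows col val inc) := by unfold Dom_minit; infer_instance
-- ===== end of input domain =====

-- B builds one flat list of all rows*col values, then slices it into rows (generate-then-reshape decomposition); return values proved equal on all ints.

-- ===== PORT A =====
-- Python lists are dynamic arrays: mat/rows are Arrays (append = push); mat[i].append(val) is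
-- get row i, push, store back — i is always a valid index in A's loop, so setIfInBounds is exact
def minit (rows : Int) (col : Int) (val : Int) (inc : Int) : List (List Int) :=
  (((PySem.List.pyRange 0 rows 1).foldl
    (fun (s : Array (Array Int) × Int) (i : Int) =>
      (PySem.List.pyRange 0 col 1).foldl
        (fun (t : Array (Array Int) × Int) _ =>
          (t.1.setIfInBounds i.toNat ((t.1.getD i.toNat #[]).push t.2), t.2 + inc))
        (s.1.push #[], s.2))
    (#[], val)).1.map (fun r => r.toList)).toList

-- ===== PORT B =====
-- flat.append = Array.push; the comprehensions = map over PySem.List.pyRange; slices = PySem slices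
def minit_alt (rows : Int) (col : Int) (val : Int) (inc : Int) : List (List Int) :=
  if col ≤ 0 then
    (PySem.List.pyRange 0 rows 1).map (fun _ => [])
  else
    let flat := ((PySem.List.pyRange 0 (rows * col) 1).foldl
      (fun (s : Array Int × Int) _ => (s.1.push s.2, s.2 + inc)) (#[], val)).1.toList
    (PySem.List.pyRange 0 rows 1).map
      (fun i => PySem.List.slice flat (some (i * col)) (some ((i + 1) * col)))

-- ===== PRECONDITION & SPEC =====
def Spec_minit (rows : Int) (col : Int) (val : Int) (inc : Int) (out : List (List Int)) : Prop := out = minit_alt rows col val inc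
instance (rows : Int) (col : Int) (val : Int) (inc : Int) (out : List (List Int)) : Decidable (Spec_minit rows col val inc out) := by unfold Spec_minit; infer_instance

-- ===== CLAIM (what is proved, stated in full; the proofs are below) =====
def Claim_equal_minit : Prop := ∀ (rows : Int) (col : Int) (val : Int) (inc : Int), Dom_minit rows col val inc → Spec_minit rows col val inc (minit rows col val inc)

-- ===== LEMMAS AND PROOFS =====

-- the arithmetic progression of length c starting at v with step inc
def mrow : Nat → Int → Int → List Int
  | 0, _, _ => []
  | c + 1, v, inc => v :: mrow c (v + inc) inc

-- the common closed form of both ports: n rows of c consecutive values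
def mmodel : Nat → Nat → Int → Int → List (List Int)
  | 0, _, _, _ => []
  | n + 1, c, v, inc => mrow c v inc :: mmodel n c (v + (c : Int) * inc) inc

lemma length_mrow (c : Nat) : ∀ (v inc : Int), (mrow c v inc).length = c := by
  induction c with
  | zero => intro v inc; rfl
  | succ c ih => intro v inc; simp [mrow, ih]

lemma mrow_split (a : Nat) : ∀ (b : Nat) (v inc : Int),
    mrow (a + b) v inc = mrow a v inc ++ mrow b (v + (a : Int) * inc) inc := by
  induction a with
  | zero => intro b v inc; simp [mrow]
  | succ a ih =>
      intro b v inc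
      have h : a + 1 + b = (a + b) + 1 := by omega
      rw [h]
      show v :: mrow (a + b) (v + inc) inc = (v :: mrow a (v + inc) inc) ++ _
      rw [ih]
      simp only [List.cons_append]
      have h2 : v + inc + (a : Int) * inc = v + ((a + 1 : Nat) : Int) * inc := by
        push_cast; ring
      rw [h2]

lemma mmodel_zero_col (inc : Int) : ∀ (n : Nat) (v : Int),
    mmodel n 0 v inc = List.replicate n [] := by
  intro n
  induction n with
  | zero => intro v; rfl
  | succ n ih => intro v; simp [mmodel, mrow, ih, List.replicate]

-- B's flat pass produces an arithmetic progression
lemma foldl_flat (inc : Int) : ∀ (l : List Int) (acc : Array Int) (v : Int),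
    l.foldl (fun (s : Array Int × Int) _ => (s.1.push s.2, s.2 + inc)) (acc, v)
      = (acc ++ (mrow l.length v inc).toArray, v + (l.length : Int) * inc) := by
  intro l
  induction l with
  | nil =>
      intro acc v
      simp only [List.foldl_nil, List.length_nil]
      refine congrArg₂ _ ?_ (by simp)
      rw [← Array.toList_inj]
      simp [mrow]
  | cons a l ih =>
      intro acc v
      simp only [List.foldl_cons, ih, List.length_cons]
      simp only [Prod.mk.injEq]
      constructor
      · rw [← Array.toList_inj]
        show _ = (acc ++ (v :: mrow l.length (v + inc) inc).toArray).toList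
        simp
      · push_cast; ring

-- slicing row k out of the flat progression of n·c values gives the k-th model row
lemma slice_chunk (c k n : Nat) (hk : k < n) (w inc : Int) :
    PySem.List.slice (mrow (n * c) w inc)
      (some ((k * c : Nat) : Int)) (some (((k + 1) * c : Nat) : Int))
      = mrow c (w + ((k * c : Nat) : Int) * inc) inc := by
  rw [PySem.List.slice_natCast]
  have h1 : n * c = k * c + ((n - k) * c) := by
    have : n = k + (n - k) := by omega
    calc n * c = (k + (n - k)) * c := by rw [← this]
    _ = k * c + (n - k) * c := by ring
  rw [h1, mrow_split]
  rw [List.drop_left' (length_mrow _ _ _)]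
  have h3 : (k + 1) * c - k * c = c := by rw [Nat.add_mul, one_mul]; omega
  rw [h3]
  obtain ⟨m, hm⟩ : ∃ m, n - k = m + 1 := ⟨n - k - 1, by omega⟩
  rw [hm, Nat.add_mul, one_mul, Nat.add_comm, mrow_split]
  rw [List.take_left' (length_mrow _ _ _)]

-- the model as a map over row indices
lemma mmodel_map (c : Nat) (inc : Int) : ∀ (n m : Nat) (v : Int),
    (List.range' m n).map (fun k => mrow c (v + ((k * c : Nat) : Int) * inc) inc)
      = mmodel n c (v + ((m * c : Nat) : Int) * inc) inc := by
  intro n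
  induction n with
  | zero => intro m v; rfl
  | succ n ih =>
      intro m v
      rw [List.range'_succ, List.map_cons, mmodel]
      congr 1
      rw [ih (m + 1) v]
      congr 1
      push_cast; ring

-- A's inner loop: one Python step 'mat[i].append(v)' on mat = pre + [r] with i = len(pre)
lemma push_set_step (pre : Array (Array Int)) (r : Array Int) (v : Int) :
    (pre.push r).setIfInBounds pre.size (((pre.push r).getD pre.size #[]).push v)
      = pre.push (r.push v) := by
  have hg : (pre.push r).getD pre.size #[] = r := by
    simp [Array.getD, Array.size_push]
  rw [hg, ← Array.toList_inj]
  simp [Array.toList_setIfInBounds]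

-- A's inner loop appends an arithmetic progression to the last row
lemma foldl_row (inc : Int) (m : Nat) :
    ∀ (l : List Int) (pre : Array (Array Int)) (r : Array Int) (v : Int), pre.size = m →
    l.foldl (fun (t : Array (Array Int) × Int) _ =>
        (t.1.setIfInBounds m ((t.1.getD m #[]).push t.2), t.2 + inc)) (pre.push r, v)
      = (pre.push (r ++ (mrow l.length v inc).toArray), v + (l.length : Int) * inc) := by
  intro l
  induction l with
  | nil =>
      intro pre r v hm
      simp only [List.foldl_nil, List.length_nil]
      refine congrArg₂ _ ?_ (by simp)
      rw [← Array.toList_inj]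
      simp [mrow]
  | cons a l ih =>
      intro pre r v hm
      subst hm
      simp only [List.foldl_cons, push_set_step, List.length_cons]
      rw [ih pre (r.push v) (v + inc) rfl]
      simp only [Prod.mk.injEq]
      constructor
      · rw [← Array.toList_inj]
        show _ = (pre.push (r ++ (v :: mrow l.length (v + inc) inc).toArray)).toList
        simp
      · push_cast; ring

-- A's outer loop builds the model rows
lemma foldl_mat (col inc : Int) : ∀ (n m : Nat) (pre : Array (Array Int)) (v : Int),
    pre.size = m →
    ((List.range' m n).map (fun k : Nat => (k : Int))).foldl
      (fun (s : Array (Array Int) × Int) (i : Int) =>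
        (PySem.List.pyRange 0 col 1).foldl
          (fun (t : Array (Array Int) × Int) _ =>
            (t.1.setIfInBounds i.toNat ((t.1.getD i.toNat #[]).push t.2), t.2 + inc))
          (s.1.push #[], s.2))
      (pre, v)
      = (pre ++ ((mmodel n col.toNat v inc).map List.toArray).toArray,
         v + ((n * col.toNat : Nat) : Int) * inc) := by
  intro n
  induction n with
  | zero =>
      intro m pre v hm
      simp only [List.range'_zero, List.map_nil, List.foldl_nil]
      refine congrArg₂ _ ?_ (by simp)
      rw [← Array.toList_inj]
      simp [mmodel]
  | succ n ih =>
      intro m pre v hm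
      rw [List.range'_succ, List.map_cons, List.foldl_cons]
      simp only [Int.toNat_natCast]
      rw [foldl_row inc m (PySem.List.pyRange 0 col 1) pre #[] v hm]
      rw [PySem.List.length_pyRange_one]
      have hcc : (col - 0).toNat = col.toNat := by norm_num
      rw [hcc]
      have hempty : (#[] : Array Int) ++ (mrow col.toNat v inc).toArray
          = (mrow col.toNat v inc).toArray := by
        rw [← Array.toList_inj]; simp
      rw [hempty]
      rw [ih (m + 1) (pre.push (mrow col.toNat v inc).toArray) _ (by simp [hm])]
      simp only [Prod.mk.injEq]
      constructor
      · rw [← Array.toList_inj]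
        show _ = (pre ++ ((mrow col.toNat v inc :: mmodel n col.toNat (v + (col.toNat : Int) * inc) inc).map List.toArray).toArray).toList
        simp
      · push_cast; ring

lemma minit_eq_model (rows col val inc : Int) :
    minit rows col val inc = mmodel rows.toNat col.toNat val inc := by
  unfold minit
  rw [PySem.List.pyRange_one 0 rows]
  have h0 : (List.map (fun k : Nat => (0 : Int) + (k : Int)) (List.range (rows - 0).toNat))
      = (List.range' 0 rows.toNat).map (fun k : Nat => (k : Int)) := by
    simp [List.range_eq_range']
  rw [h0, foldl_mat col inc rows.toNat 0 #[] val rfl]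
  simp [Function.comp_def]

lemma minit_alt_eq_model (rows col val inc : Int) :
    minit_alt rows col val inc = mmodel rows.toNat col.toNat val inc := by
  unfold minit_alt
  split_ifs with hc
  · -- degenerate width: rows empty rows on both sides
    have hcn : col.toNat = 0 := by omega
    rw [hcn, mmodel_zero_col, PySem.List.pyRange_one 0 rows, List.map_map]
    rw [List.eq_replicate_iff]
    refine ⟨by simp, ?_⟩
    intro b hb
    simp only [List.mem_map] at hb
    obtain ⟨k, _, hk⟩ := hb
    exact hk.symm
  · rw [foldl_flat inc (PySem.List.pyRange 0 (rows * col) 1) #[] val]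
    simp only [PySem.List.length_pyRange_one]
    have hflat : ((#[] : Array Int) ++ (mrow (rows * col - 0).toNat val inc).toArray).toList
        = mrow (rows * col - 0).toNat val inc := by simp
    rw [hflat]
    rw [PySem.List.pyRange_one 0 rows]
    have h0 : (List.map (fun k : Nat => (0 : Int) + (k : Int)) (List.range (rows - 0).toNat))
        = (List.range' 0 rows.toNat).map (fun k : Nat => (k : Int)) := by
      simp [List.range_eq_range']
    rw [h0, List.map_map]
    by_cases hr0 : rows ≤ 0
    · have h2 : rows.toNat = 0 := by omega
      rw [h2]
      simp [mmodel]
    · have hr : (0 : Int) < rows := by omega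
      have hc' : (0 : Int) < col := by omega
      have hn : (rows * col - 0).toNat = rows.toNat * col.toNat := by
        obtain ⟨R, hR⟩ := Int.eq_ofNat_of_zero_le hr.le
        obtain ⟨c0, hc0⟩ := Int.eq_ofNat_of_zero_le hc'.le
        subst hR; subst hc0
        rw [sub_zero, ← Nat.cast_mul, Int.toNat_natCast, Int.toNat_natCast, Int.toNat_natCast]
      rw [hn]
      have hmap : ∀ k ∈ List.range' 0 rows.toNat,
          ((fun i => PySem.List.slice (mrow (rows.toNat * col.toNat) val inc)
              (some (i * col)) (some ((i + 1) * col))) ∘ (fun k : Nat => (k : Int))) k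
            = mrow col.toNat (val + ((k * col.toNat : Nat) : Int) * inc) inc := by
        intro k hk
        have hklt : k < rows.toNat := by
          rw [List.mem_range'] at hk; omega
        simp only [Function.comp_apply]
        have e1 : (k : Int) * col = ((k * col.toNat : Nat) : Int) := by
          obtain ⟨c0, hc0⟩ := Int.eq_ofNat_of_zero_le hc'.le
          rw [hc0, Int.toNat_natCast]; push_cast; ring
        have e2 : ((k : Int) + 1) * col = (((k + 1) * col.toNat : Nat) : Int) := by
          obtain ⟨c0, hc0⟩ := Int.eq_ofNat_of_zero_le hc'.le
          rw [hc0, Int.toNat_natCast]; push_cast; ring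
        rw [e1, e2, slice_chunk col.toNat k rows.toNat hklt val inc]
      rw [List.map_congr_left hmap]
      have := mmodel_map col.toNat inc rows.toNat 0 val
      simpa using this

-- ===== VERDICT (by name: the statement is the Claim_ definition above) =====
theorem minit_spec : Claim_equal_minit := by
  intro rows col val inc _
  unfold Spec_minit
  rw [minit_eq_model, minit_alt_eq_model]
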